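-- pv_equiv track=rewrite | github.com/collinsakenga/codewars_solutions | 6 kyu/6 kyu_Simple max digit sum.py | solve
-- ===== SOURCE A (Python) =====
-- def solve(n):
--     if n < 10:
--         return n
--     else:
--         append_string = ""
--         temp = list(str(n))
--         total = 0
--         index = 0
--         for num in temp:
--             total += int(num)
--         if total >= int(temp[0])+9*(len(temp)-1)-1:
--             return n
--         if int(temp[0]) != 9 and int(temp[1]) != 9:
--             return int(str(int(temp[0])-1)+"9"*(len(temp)-1))
--         else:
--             for num in temp:
--                 if num != "9" and index > 0:
--                     break
--                 append_string += num
--                 index += 1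
--             return int(str(int(append_string)-1)+"9"*(len(temp)-index))
-- ===== SOURCE B (Python) =====
-- def solve(n):
--     if n < 10:
--         return n
--     # digit count and digit sum by pure arithmetic (no strings)
--     total, L, m = 0, 0, n
--     while m > 0:
--         total += m % 10
--         m //= 10
--         L += 1
--     p = 10 ** (L - 1)
--     lead = n // p
--     if total >= lead + 9 * (L - 1) - 1:
--         return n
--     # q := leading digit followed by its run of nines; answer is q*w - 1 (closed form)
--     q, w = lead, p
--     while (n // (w // 10)) % 10 == 9:
--         q, w = q * 10 + 9, w // 10
--     return q * w - 1
-- ===== Notes on version B (the rewrite author's own statement) =====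
-- stated objective: simpler
-- what changed: B drops all string work (list(str(n)), per-char int() parsing, string concatenation and int() re-parsing of built strings): a single divmod loop yields digit count and digit sum, and one arithmetic scan over the run of nines after the leading digit produces the answer as the closed form q*w-1, merging A's two constructive string branches into one.
import Mathlib
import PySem

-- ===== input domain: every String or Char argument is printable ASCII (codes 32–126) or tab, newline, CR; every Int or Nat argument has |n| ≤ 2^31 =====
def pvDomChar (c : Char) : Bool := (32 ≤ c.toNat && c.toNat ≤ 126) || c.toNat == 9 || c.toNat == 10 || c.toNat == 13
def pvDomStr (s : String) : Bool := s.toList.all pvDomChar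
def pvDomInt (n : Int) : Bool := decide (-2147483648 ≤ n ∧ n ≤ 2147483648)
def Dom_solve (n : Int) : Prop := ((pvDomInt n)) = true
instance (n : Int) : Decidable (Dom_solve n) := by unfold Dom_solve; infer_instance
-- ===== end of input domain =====

-- B replaces A's string building/parsing with pure integer arithmetic (simpler, one merged branch); return values proved equal on the domain.

-- ===== PORT A =====
-- int(num) applied to a one-character string (always a digit char on every path A takes)
def solveChr (c : Char) : Int := (PySem.Int.ofChars? [c]).getD 0

-- the 'for num in temp: … break' loop of A's final branch, with state (append_string, index)
def solveLoop : List Char → List Char → Int → List Char × Int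
  | [], acc, idx => (acc, idx)
  | c :: rest, acc, idx =>
    if c ≠ '9' ∧ idx > 0 then (acc, idx)
    else solveLoop rest (acc ++ [c]) (idx + 1)

def solve (n : Int) : Int :=
  if n < 10 then n
  else
    let temp := PySem.Int.toChars n
    let total := temp.foldl (fun t c => t + solveChr c) 0
    if total ≥ solveChr (PySem.List.pyGetD temp 0 '0') + 9 * (PySem.List.len temp - 1) - 1 then n
    else if solveChr (PySem.List.pyGetD temp 0 '0') ≠ 9 ∧ solveChr (PySem.List.pyGetD temp 1 '0') ≠ 9 then
      (PySem.Int.ofChars? (PySem.Int.toChars (solveChr (PySem.List.pyGetD temp 0 '0') - 1)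
        ++ List.replicate (PySem.List.len temp - 1).toNat '9')).getD 0
    else
      let r := solveLoop temp [] 0
      (PySem.Int.ofChars? (PySem.Int.toChars ((PySem.Int.ofChars? r.1).getD 0 - 1)
        ++ List.replicate (PySem.List.len temp - r.2).toNat '9')).getD 0

-- ===== PORT B =====
-- the 'while m > 0' digit count/sum loop of Source B (fuel only makes it total; 64 ≥ any digit count on Dom)
def solveAltCount (total L m : Int) (fuel : Nat) : Int × Int :=
  match fuel with
  | 0 => (total, L)
  | fuel + 1 =>
    if m > 0 then solveAltCount (total + PySem.Int.mod m 10) (L + 1) (PySem.Int.floordiv m 10) fuel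
    else (total, L)

-- the 'while (n // (w // 10)) % 10 == 9' loop of Source B (fuel only makes it total)
def solveAltNines (n q w : Int) (fuel : Nat) : Int × Int :=
  match fuel with
  | 0 => (q, w)
  | fuel + 1 =>
    if PySem.Int.mod (PySem.Int.floordiv n (PySem.Int.floordiv w 10)) 10 = 9 then
      solveAltNines n (q * 10 + 9) (PySem.Int.floordiv w 10) fuel
    else (q, w)

def solve_alt (n : Int) : Int :=
  if n < 10 then n
  else
    let tl := solveAltCount 0 0 n 64
    let p : Int := 10 ^ (tl.2 - 1).toNat
    let lead := PySem.Int.floordiv n p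
    if tl.1 ≥ lead + 9 * (tl.2 - 1) - 1 then n
    else
      let qw := solveAltNines n lead p 64
      qw.1 * qw.2 - 1

-- ===== PRECONDITION & SPEC =====
def Spec_solve (n : Int) (out : Int) : Prop := out = solve_alt n
instance (n : Int) (out : Int) : Decidable (Spec_solve n out) := by unfold Spec_solve; infer_instance

-- ===== CLAIM (what is proved, stated in full; the proofs are below) =====
def Claim_equal_solve : Prop := ∀ (n : Int), Dom_solve n → Spec_solve n (solve n)


-- ===== LEMMAS AND PROOFS =====

-- ---- digits infrastructure ----

lemma digits_div_pow (m : Nat) : ∀ (N : Nat), Nat.digits 10 (N / 10 ^ m) = (Nat.digits 10 N).drop m := by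
  induction m with
  | zero => intro N; simp
  | succ m ih =>
    intro N
    have h1 : N / 10 ^ (m + 1) = (N / 10) / 10 ^ m := by
      rw [Nat.div_div_eq_div_mul, pow_succ, mul_comm]
    have h2 : Nat.digits 10 (N / 10) = (Nat.digits 10 N).tail := by
      rcases Nat.eq_zero_or_pos N with h0 | h0
      · simp [h0]
      · rw [Nat.digits_def' (by norm_num) h0]; rfl
    rw [h1, ih, h2, ← List.drop_one, List.drop_drop]
    congr 1
    omega

lemma digit_getD (N m : Nat) : (Nat.digits 10 N)[m]?.getD 0 = N / 10 ^ m % 10 := by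
  have h : (Nat.digits 10 N)[m]? = (Nat.digits 10 (N / 10 ^ m))[0]? := by
    rw [digits_div_pow m N, List.getElem?_drop, Nat.add_zero]
  rcases Nat.eq_zero_or_pos (N / 10 ^ m) with h0 | h0
  · rw [h, h0]
    simp
  · rw [h, Nat.digits_def' (by norm_num) h0]
    simp

lemma toDigitsCore_eq : ∀ (fuel m : Nat) (acc : List Char), 0 < m → m < fuel →
    Nat.toDigitsCore 10 fuel m acc = ((Nat.digits 10 m).reverse.map Nat.digitChar) ++ acc := by
  intro fuel
  induction fuel with
  | zero => intro m acc h1 h2; omega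
  | succ fuel ih =>
    intro m acc hm hlt
    rw [Nat.toDigitsCore]
    by_cases h0 : m / 10 = 0
    · rw [if_pos h0]
      have hm10 : m < 10 := by omega
      rw [Nat.digits_def' (show 1 < 10 by norm_num) hm, h0]
      simp
    · rw [if_neg h0]
      have hdl : m / 10 < m := Nat.div_lt_self hm (by norm_num)
      rw [ih (m / 10) _ (by omega) (by omega)]
      rw [Nat.digits_def' (show 1 < 10 by norm_num) hm]
      simp

lemma toChars_eq (n : Int) (h : 10 ≤ n) :
    PySem.Int.toChars n = (Nat.digits 10 n.toNat).reverse.map Nat.digitChar := by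
  unfold PySem.Int.toChars
  rw [if_neg (by omega)]
  unfold Nat.toDigits
  rw [toDigitsCore_eq (n.toNat + 1) n.toNat [] (by omega) (by omega)]
  simp

lemma floordiv_coe10 (m : Nat) : PySem.Int.floordiv (m : Int) 10 = ((m / 10 : Nat) : Int) := by
  exact_mod_cast PySem.Int.floordiv_natCast m 10

lemma mod_coe10 (m : Nat) : PySem.Int.mod (m : Int) 10 = ((m % 10 : Nat) : Int) := by
  exact_mod_cast PySem.Int.mod_natCast m 10

-- ---- closed parse facts (bounded digits; kernel-checked) ----

set_option maxHeartbeats 1000000 in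
lemma parse_digitChar : ∀ d ≤ 9, PySem.Int.ofChars? [Nat.digitChar d] = some (d : Int) := by decide

set_option maxHeartbeats 1000000 in
lemma parse_prefix : ∀ d ≤ 9, ∀ j ≤ 9,
    PySem.Int.ofChars? (Nat.digitChar d :: List.replicate j '9')
      = some ((d * 10 ^ j + (10 ^ j - 1) : Nat) : Int) := by decide

set_option maxHeartbeats 4000000 in
lemma parse_final : ∀ e < 9, ∀ j < 10, ∀ k < 9,
    PySem.Int.ofChars? (PySem.Int.toChars ((((e + 1) * 10 ^ j + (10 ^ j - 1) : Nat) : Int) - 1)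
        ++ List.replicate (k + 1) '9')
      = some ((((e + 1) * 10 ^ j + (10 ^ j - 1) : Nat) : Int) * 10 ^ (k + 1) - 1) := by decide

lemma digitChar_ne_nine : ∀ d ≤ 9, d ≠ 9 → Nat.digitChar d ≠ '9' := by decide

lemma solveChr_digitChar (d : Nat) (h : d ≤ 9) : solveChr (Nat.digitChar d) = (d : Int) := by
  unfold solveChr
  rw [parse_digitChar d h]
  rfl

-- ---- A-side loops ----

lemma fold_sum : ∀ (ds : List Nat) (a : Int), (∀ d ∈ ds, d ≤ 9) →
    List.foldl (fun t c => t + solveChr c) a (ds.map Nat.digitChar) = a + ds.sum := by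
  intro ds
  induction ds with
  | nil => intro a h; simp
  | cons d ds ih =>
    intro a h
    simp only [List.map_cons, List.foldl_cons, List.sum_cons]
    rw [solveChr_digitChar d (h d (by simp)), ih _ (fun x hx => h x (by simp [hx]))]
    push_cast
    ring

lemma solveLoop_run : ∀ (T : List Nat) (acc : List Char) (idx : Int), 1 ≤ idx →
    (∀ d ∈ T, d ≤ 9) → (T.takeWhile (· == 9)).length < T.length →
    solveLoop (T.map Nat.digitChar) acc idx =
      (acc ++ (T.takeWhile (· == 9)).map Nat.digitChar,
        idx + ((T.takeWhile (· == 9)).length : Int)) := by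
  intro T
  induction T with
  | nil => intro acc idx h1 h2 h3; simp at h3
  | cons t T ih =>
    intro acc idx hidx hd hlt
    by_cases h9 : t = 9
    · subst h9
      rw [List.takeWhile_cons_of_pos (by simp)] at hlt ⊢
      simp only [List.map_cons, solveLoop]
      rw [if_neg (by simp [show Nat.digitChar 9 = '9' from rfl])]
      rw [ih (acc ++ [Nat.digitChar 9]) (idx + 1) (by omega)
        (fun x hx => hd x (by simp [hx])) (by simpa using hlt)]
      simp only [List.length_cons, Prod.mk.injEq]
      constructor
      · simp
      · push_cast; ring
    · rw [List.takeWhile_cons_of_neg (by simpa using h9)]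
      simp only [List.map_cons, solveLoop]
      rw [if_pos ⟨digitChar_ne_nine t (hd t (by simp)) h9, by omega⟩]
      simp

lemma takeWhile_stop {α : Type} (p : α → Bool) :
    ∀ (T : List α), (T.takeWhile p).length < T.length →
      ∀ x, T[(T.takeWhile p).length]? = some x → p x = false := by
  intro T
  induction T with
  | nil => intro h; simp at h
  | cons t T ih =>
    intro h x hx
    by_cases hp : p t
    · rw [List.takeWhile_cons_of_pos hp] at h hx
      rw [List.length_cons, List.getElem?_cons_succ] at hx
      exact ih (by simpa using h) x hx
    · rw [List.takeWhile_cons_of_neg (by simpa using hp)] at h hx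
      simp only [List.length_nil, List.getElem?_cons_zero, Option.some.injEq] at hx
      subst hx
      simpa using hp

-- ---- B-side loops ----

lemma solveAltCount_eq : ∀ (fuel m : Nat), (Nat.digits 10 m).length ≤ fuel → ∀ (total L : Int),
    solveAltCount total L (m : Int) fuel
      = (total + ((Nat.digits 10 m).sum : Int), L + ((Nat.digits 10 m).length : Int)) := by
  intro fuel
  induction fuel with
  | zero =>
    intro m h total L
    have hm : m = 0 := by
      rcases Nat.eq_zero_or_pos m with h0 | h0
      · exact h0
      · rw [Nat.digits_def' (show 1 < 10 by norm_num) h0] at h; simp at h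
    subst hm
    simp [solveAltCount]
  | succ fuel ih =>
    intro m h total L
    rcases Nat.eq_zero_or_pos m with h0 | h0
    · subst h0
      simp [solveAltCount]
    · rw [solveAltCount]
      rw [if_pos (by exact_mod_cast h0)]
      rw [mod_coe10 m, floordiv_coe10 m]
      rw [Nat.digits_def' (show 1 < 10 by norm_num) h0] at h ⊢
      rw [ih (m / 10) (by simpa using h)]
      simp only [List.sum_cons, List.length_cons, Prod.mk.injEq]
      constructor
      · push_cast; ring
      · push_cast; ring

lemma solveAltNines_run (N L j : Nat) (hjL : j + 2 ≤ L)
    (h9 : ∀ i, 1 ≤ i → i ≤ j → N / 10 ^ (L - 1 - i) % 10 = 9)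
    (hstop : N / 10 ^ (L - 2 - j) % 10 ≠ 9) :
    ∀ (d i : Nat), i + d = j → ∀ (q : Int) (fuel : Nat), d < fuel →
    solveAltNines (N : Int) q ((10 : Int) ^ (L - 1 - i)) fuel =
      (q * 10 ^ d + ((10 : Int) ^ d - 1), (10 : Int) ^ (L - 1 - j)) := by
  intro d
  induction d with
  | zero =>
    intro i hij q fuel hfuel
    obtain ⟨f, rfl⟩ : ∃ f, fuel = f + 1 := ⟨fuel - 1, by omega⟩
    have hij' : i = j := by omega
    rw [solveAltNines]
    have hw : PySem.Int.floordiv ((10 : Int) ^ (L - 1 - i)) 10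
        = ((10 ^ (L - 2 - i) : Nat) : Int) := by
      have h1 : ((10 : Int) ^ (L - 1 - i)) = ((10 ^ (L - 2 - i) * 10 : Nat) : Int) := by
        push_cast
        rw [← pow_succ]
        congr 1
        omega
      rw [h1, floordiv_coe10]
      congr 1
      omega
    have hstop' : N / 10 ^ (L - 2 - i) % 10 ≠ 9 := by rw [hij']; exact hstop
    rw [hw, PySem.Int.floordiv_natCast, mod_coe10]
    rw [if_neg (by exact_mod_cast hstop')]
    rw [hij', Prod.mk.injEq]
    constructor
    · ring
    · rfl
  | succ d ihd =>
    intro i hij q fuel hfuel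
    obtain ⟨f, rfl⟩ : ∃ f, fuel = f + 1 := ⟨fuel - 1, by omega⟩
    rw [solveAltNines]
    have hw : PySem.Int.floordiv ((10 : Int) ^ (L - 1 - i)) 10
        = ((10 ^ (L - 2 - i) : Nat) : Int) := by
      have h1 : ((10 : Int) ^ (L - 1 - i)) = ((10 ^ (L - 2 - i) * 10 : Nat) : Int) := by
        push_cast
        rw [← pow_succ]
        congr 1
        omega
      rw [h1, floordiv_coe10]
      congr 1
      omega
    have h9i : N / 10 ^ (L - 2 - i) % 10 = 9 := by
      have := h9 (i + 1) (by omega) (by omega)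
      have he : L - 1 - (i + 1) = L - 2 - i := by omega
      rwa [he] at this
    rw [hw, PySem.Int.floordiv_natCast, mod_coe10]
    rw [if_pos (by exact_mod_cast h9i)]
    have hcast : ((10 ^ (L - 2 - i) : Nat) : Int) = (10 : Int) ^ (L - 1 - (i + 1)) := by
      push_cast
      congr 1
      omega
    rw [hcast, ihd (i + 1) (by omega) (q * 10 + 9) f (by omega)]
    rw [Prod.mk.injEq]
    constructor
    · ring
    · rfl

-- ---- main equivalence ----

lemma main_eq (n : Int) (hdom : Dom_solve n) : solve n = solve_alt n := by
  by_cases hn : n < 10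
  · unfold solve solve_alt
    rw [if_pos hn, if_pos hn]
  · push_neg at hn
    have hNle : n ≤ 2147483648 := by
      unfold Dom_solve pvDomInt at hdom
      simp only [decide_eq_true_eq] at hdom
      exact hdom.2
    set N : Nat := n.toNat with hNdef
    have hnN : n = (N : Int) := by omega
    have hN10 : 10 ≤ N := by omega
    have hN31 : N ≤ 2147483648 := by omega
    set Ds : List Nat := Nat.digits 10 N with hDs
    set L : Nat := Ds.length with hLdef
    have hNlt : N < 10 ^ L := Nat.lt_base_pow_length_digits (by norm_num)
    have hL2 : 2 ≤ L := by
      by_contra hc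
      push_neg at hc
      have h1 : (10:Nat) ^ L ≤ 10 ^ 1 := Nat.pow_le_pow_right (by norm_num) (by omega)
      simp at h1
      omega
    have hL10 : L ≤ 10 := by
      by_contra hc
      push_neg at hc
      have h1 : (10:Nat) ^ L ≤ 10 * N := Nat.base_pow_length_digits_le 10 N (by norm_num) (by omega)
      have h2 : (10:Nat) ^ 11 ≤ 10 ^ L := Nat.pow_le_pow_right (by norm_num) (by omega)
      have h3 : (10:Nat) ^ 11 = 100000000000 := by norm_num
      omega
    have hdigle : ∀ d ∈ Ds, d ≤ 9 := fun d hd => by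
      have := Nat.digits_lt_base (by norm_num) hd
      omega
    have hdig : ∀ m : Nat, Ds[m]?.getD 0 = N / 10 ^ m % 10 := fun m => digit_getD N m
    have hDne : Ds ≠ [] := by
      intro h
      rw [hDs, Nat.digits_eq_nil_iff_eq_zero] at h
      omega
    set d0 : Nat := N / 10 ^ (L - 1) % 10 with hd0def
    set d1 : Nat := N / 10 ^ (L - 2) % 10 with hd1def
    have hdiv_lt : N / 10 ^ (L - 1) < 10 := by
      have h1 : (10:Nat) ^ L = 10 ^ (L - 1) * 10 := by
        rw [← pow_succ]
        congr 1
        omega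
      rw [Nat.div_lt_iff_lt_mul (Nat.pow_pos (by norm_num))]
      omega
    have hd0div : N / 10 ^ (L - 1) = d0 := by
      rw [hd0def, Nat.mod_eq_of_lt hdiv_lt]
    have hDsL1 : Ds[L - 1]? = some d0 := by
      have h := hdig (L - 1)
      rw [List.getElem?_eq_getElem (show L - 1 < Ds.length by omega)] at h ⊢
      simp only [Option.getD_some] at h
      rw [h]
    have hDsL2 : Ds[L - 2]? = some d1 := by
      have h := hdig (L - 2)
      rw [List.getElem?_eq_getElem (show L - 2 < Ds.length by omega)] at h ⊢
      simp only [Option.getD_some] at h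
      rw [h]
    have hd0pos : 1 ≤ d0 := by
      have h := Nat.getLast_digit_ne_zero 10 (show N ≠ 0 by omega)
      rw [List.getLast_eq_getElem] at h
      simp only [← hDs, ← hLdef] at h
      have h2 := hDsL1
      rw [List.getElem?_eq_getElem (show L - 1 < Ds.length by omega)] at h2
      simp only [Option.some.injEq] at h2
      rw [h2] at h
      omega
    have hd0le : d0 ≤ 9 := by
      rw [hd0def]
      omega
    have hd1le : d1 ≤ 9 := by
      rw [hd1def]
      omega
    -- A-side basic rewrites
    have htemp : PySem.Int.toChars n = Ds.reverse.map Nat.digitChar := by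
      rw [toChars_eq n hn, ← hNdef, ← hDs]
    have hrevne : Ds.reverse ≠ [] := by simpa using hDne
    have hrevlen : Ds.reverse.length = L := by simp [← hLdef]
    have hcons : Ds.reverse = d0 :: Ds.reverse.tail := by
      obtain ⟨hd, tl, hx⟩ := List.exists_cons_of_ne_nil hrevne
      have h0 : Ds.reverse[0]? = some d0 := by
        rw [List.getElem?_reverse (by omega)]
        rw [show Ds.length - 1 - 0 = L - 1 by omega]
        exact hDsL1
      rw [hx] at h0 ⊢
      simp only [List.getElem?_cons_zero, Option.some.injEq] at h0
      rw [h0]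
      rfl
    set T : List Nat := Ds.reverse.tail with hT
    have hTlen : T.length = L - 1 := by
      rw [hT, List.length_tail, hrevlen]
    have hTmem : ∀ d ∈ T, d ≤ 9 := by
      intro d hd
      exact hdigle d (by
        have : d ∈ Ds.reverse := by
          rw [hcons]
          exact List.mem_cons_of_mem _ hd
        simpa using this)
    have hTget : ∀ i, i < T.length → T[i]? = Ds[L - 2 - i]? := by
      intro i hi
      rw [hT, ← List.drop_one, List.getElem?_drop, List.getElem?_reverse (by omega)]
      congr 1
      omega
    have hsum : Ds.sum = d0 + T.sum := by
      have h1 : Ds.reverse.sum = Ds.sum := List.sum_reverse Ds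
      rw [← h1, hcons]
      simp
    have hlenA : PySem.List.len (Ds.reverse.map Nat.digitChar) = (L : Int) := by
      rw [PySem.List.len_eq]
      simp [← hLdef]
    have htemp0 : PySem.List.pyGetD (Ds.reverse.map Nat.digitChar) 0 '0' = Nat.digitChar d0 := by
      rw [PySem.List.pyGetD_zero, hcons]
      simp
    have htemp1 : PySem.List.pyGetD (Ds.reverse.map Nat.digitChar) 1 '0' = Nat.digitChar d1 := by
      have h1 : (1 : Nat) < (Ds.reverse.map Nat.digitChar).length := by
        simp only [List.length_map, hrevlen]
        omega
      rw [show (1 : Int) = ((1 : Nat) : Int) by norm_num, PySem.List.pyGetD_ofNat _ 1 '0' h1]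
      rw [List.getElem_map, List.getElem_reverse]
      have h2 : Ds[Ds.length - 1 - 1]? = some d1 := by
        rw [show Ds.length - 1 - 1 = L - 2 by omega]
        exact hDsL2
      rw [List.getElem?_eq_getElem (show Ds.length - 1 - 1 < Ds.length by omega)] at h2
      simp only [Option.some.injEq] at h2
      rw [h2]
    have hchr0 : solveChr (PySem.List.pyGetD (Ds.reverse.map Nat.digitChar) 0 '0') = (d0 : Int) := by
      rw [htemp0, solveChr_digitChar d0 hd0le]
    have hchr1 : solveChr (PySem.List.pyGetD (Ds.reverse.map Nat.digitChar) 1 '0') = (d1 : Int) := by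
      rw [htemp1, solveChr_digitChar d1 hd1le]
    have htotal : List.foldl (fun t c => t + solveChr c) 0 (Ds.reverse.map Nat.digitChar)
        = (Ds.sum : Int) := by
      rw [fold_sum Ds.reverse 0 (by intro d hd; exact hdigle d (by simpa using hd))]
      rw [List.sum_reverse]
      ring
    -- B-side basic rewrites
    have hcount : solveAltCount 0 0 n 64 = ((Ds.sum : Int), (L : Int)) := by
      rw [hnN, solveAltCount_eq 64 N (by rw [← hDs, ← hLdef]; omega)]
      rw [← hDs, ← hLdef]
      simp
    have hlead : PySem.Int.floordiv n ((10 : Int) ^ (L - 1)) = (d0 : Int) := by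
      rw [hnN]
      rw [show ((10 : Int) ^ (L - 1)) = ((10 ^ (L - 1) : Nat) : Int) by push_cast; ring]
      rw [PySem.Int.floordiv_natCast, hd0div]
    -- unfold both sides
    simp only [solve, solve_alt]
    rw [if_neg (show ¬ n < 10 by omega), if_neg (show ¬ n < 10 by omega)]
    rw [htemp, htotal, hchr0, hchr1, hlenA, hcount]
    simp only [Prod.fst, Prod.snd]
    rw [show (((L : Int)) - 1).toNat = L - 1 by omega, hlead]
    by_cases hbig : (Ds.sum : Int) ≥ (d0 : Int) + 9 * ((L : Int) - 1) - 1
    · rw [if_pos hbig, if_pos hbig]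
    · rw [if_neg hbig, if_neg hbig]
      -- the 9-run after the leading digit
      set j : Nat := (T.takeWhile (· == 9)).length with hj
      have hjlt : j < T.length := by
        by_contra hc
        push_neg at hc
        have hle : j ≤ T.length := by
          rw [hj]
          exact (List.takeWhile_prefix _).length_le
        have hjeq : j = T.length := by omega
        have htw : T.takeWhile (· == 9) = T :=
          (List.takeWhile_prefix _).eq_of_length (by rw [← hj, hjeq])
        have hall : ∀ x ∈ T, x = 9 := by
          intro x hx
          rw [← htw] at hx
          have := List.mem_takeWhile_imp hx
          simpa using this
        have hrep : T = List.replicate T.length 9 := List.eq_replicate_of_mem hall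
        have hTsum : T.sum = 9 * T.length := by
          rw [hrep]
          simp [List.sum_replicate, Nat.smul_one_eq_cast]
          ring
        have hsum2 : (Ds.sum : Int) = (d0 : Int) + 9 * (T.length : Int) := by
          rw [hsum, hTsum]
          push_cast
          ring
        omega
      have hjL : j + 2 ≤ L := by omega
      have hrep : T.takeWhile (· == 9) = List.replicate j 9 := by
        apply List.eq_replicate_of_mem
        intro x hx
        have := List.mem_takeWhile_imp hx
        simpa using this
      have hTval : ∀ i, i < T.length → T[i]?.getD 0 = N / 10 ^ (L - 2 - i) % 10 := by
        intro i hi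
        rw [hTget i hi, hdig]
      have hj9 : ∀ i, i < j → T[i]?.getD 0 = 9 := by
        intro i hi
        have hpre : T.takeWhile (· == 9) <+: T := List.takeWhile_prefix _
        obtain ⟨rest, hrest⟩ := hpre
        rw [← hrest, List.getElem?_append_left (by rw [hrep]; simpa using hi)]
        rw [hrep]
        rw [List.getElem?_replicate_of_lt (by simpa using hi)]
        rfl
      have hstopT : T[j]?.getD 0 ≠ 9 := by
        have h1 := takeWhile_stop (· == 9) T hjlt
        rw [List.getElem?_eq_getElem hjlt]
        intro hc
        simp only [Option.getD_some] at hc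
        have := h1 T[j] (by rw [List.getElem?_eq_getElem hjlt])
        rw [hc] at this
        simp at this
      have h9' : ∀ i, 1 ≤ i → i ≤ j → N / 10 ^ (L - 1 - i) % 10 = 9 := by
        intro i h1i hij
        have h := hj9 (i - 1) (by omega)
        rw [hTval (i - 1) (by omega)] at h
        rw [show L - 2 - (i - 1) = L - 1 - i by omega] at h
        exact h
      have hstop' : N / 10 ^ (L - 2 - j) % 10 ≠ 9 := by
        have h := hstopT
        rw [hTval j hjlt] at h
        exact h
      have hnines : solveAltNines n (d0 : Int) ((10 : Int) ^ (L - 1)) 64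
          = ((d0 : Int) * 10 ^ j + ((10 : Int) ^ j - 1), (10 : Int) ^ (L - 1 - j)) := by
        rw [hnN]
        have h := solveAltNines_run N L j hjL h9' hstop' j 0 (by omega) (d0 : Int) 64 (by omega)
        rw [show L - 1 - 0 = L - 1 by omega] at h
        exact h
      rw [hnines]
      simp only [Prod.fst, Prod.snd]
      -- A side: both branches produce the same closed-form value
      have hone : (1 : Nat) ≤ 10 ^ j := Nat.one_le_pow _ _ (by norm_num)
      have hQcast : ((d0 * 10 ^ j + (10 ^ j - 1) : Nat) : Int)
          = (d0 : Int) * 10 ^ j + ((10 : Int) ^ j - 1) := by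
        push_cast [hone]
        ring
      by_cases hnine : ((d0 : Int) ≠ 9 ∧ (d1 : Int) ≠ 9)
      · rw [if_pos hnine]
        have hd1ne : d1 ≠ 9 := by
          intro hc
          exact hnine.2 (by rw [hc]; norm_num)
        have hj0 : j = 0 := by
          by_contra hc
          have h := hj9 0 (by omega)
          rw [hTval 0 (by omega)] at h
          rw [show L - 2 - 0 = L - 2 by omega] at h
          exact hd1ne (by rw [hd1def, h])
        have hp := parse_final (d0 - 1) (by omega) 0 (by norm_num) (L - 2) (by omega)
        rw [show d0 - 1 + 1 = d0 by omega] at hp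
        rw [show L - 2 + 1 = L - 1 by omega] at hp
        rw [show ((d0 * 10 ^ 0 + (10 ^ 0 - 1) : Nat) : Int) = (d0 : Int) by push_cast; ring] at hp
        rw [hp]
        simp only [Option.getD_some]
        rw [hj0]
        norm_num
      · rw [if_neg hnine]
        have hloop : solveLoop (Ds.reverse.map Nat.digitChar) [] 0
            = (Nat.digitChar d0 :: List.replicate j '9', 1 + (j : Int)) := by
          rw [hcons]
          simp only [List.map_cons, solveLoop]
          rw [if_neg (by simp)]
          simp only [List.nil_append, zero_add]
          rw [solveLoop_run T [Nat.digitChar d0] 1 (by omega) hTmem (by rw [← hj]; exact hjlt)]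
          rw [hrep]
          simp [List.map_replicate, show Nat.digitChar 9 = '9' from rfl]
        rw [hloop]
        simp only [Prod.fst, Prod.snd]
        rw [parse_prefix d0 hd0le j (by omega)]
        simp only [Option.getD_some]
        have hp := parse_final (d0 - 1) (by omega) j (by omega) (L - 2 - j) (by omega)
        rw [show d0 - 1 + 1 = d0 by omega] at hp
        rw [show L - 2 - j + 1 = L - 1 - j by omega] at hp
        rw [show ((L : Int) - (1 + (j : Int))).toNat = L - 1 - j by omega]
        rw [hp]
        simp only [Option.getD_some]
        rw [hQcast]

-- ===== VERDICT (by name: the statement is the Claim_ definition above) =====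
theorem solve_spec : Claim_equal_solve := by
  intro n hdom
  unfold Spec_solve
  exact main_eq n hdom
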